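-- pv_equiv track=rewrite | github.com/jankunasm/daily-challenges | dc1-20.py | nonRepeatingLetter2
-- ===== SOURCE A (Python) =====
-- def nonRepeatingLetter2(s):
--     letterDict = {}
--     letterLoc = {}
--     for i in range(len(s)):
--         if s[i] not in letterLoc:
--             letterLoc[s[i]] = i
--             letterDict[s[i]] = 1
--         else:
--             letterDict[s[i]] = letterDict.get(s[i]) + 1
--     if min(letterDict.items())[-1] == 1:
--         return min(letterLoc.items())[-1]
--     else:
--         return -1
-- ===== SOURCE B (Python) =====
-- def nonRepeatingLetter2(s):
--     best, idx, cnt = s[0], 0, 1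
--     for i, c in enumerate(s[1:], 1):
--         if c < best:
--             best, idx, cnt = c, i, 1
--         elif c == best:
--             cnt += 1
--     return idx if cnt == 1 else -1
-- ===== Notes on version B (the rewrite author's own statement) =====
-- stated objective: faster
-- what changed: Replaces A's build-two-dicts-then-min-over-items strategy by a single forward tournament scan that maintains only (current minimal char, its first index, its count), resetting on a smaller char and incrementing on an equal one; no dictionaries or item mins.
import Mathlib
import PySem

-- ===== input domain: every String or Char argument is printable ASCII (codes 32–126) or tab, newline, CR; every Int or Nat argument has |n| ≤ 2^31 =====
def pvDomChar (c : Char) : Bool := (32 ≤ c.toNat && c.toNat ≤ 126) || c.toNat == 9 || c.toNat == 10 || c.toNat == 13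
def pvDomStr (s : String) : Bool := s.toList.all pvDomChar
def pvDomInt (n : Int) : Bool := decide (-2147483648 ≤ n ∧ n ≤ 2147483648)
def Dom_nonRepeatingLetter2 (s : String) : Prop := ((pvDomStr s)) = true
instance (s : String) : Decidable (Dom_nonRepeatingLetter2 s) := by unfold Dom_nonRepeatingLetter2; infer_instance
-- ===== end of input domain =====

-- B replaces A's two dictionaries and min-over-items by a single tournament scan keeping (min char, first index, count); return value only.

-- ===== PORT A =====
-- loop body of A, with the current character already fetched (helper of the port)
def pvBodyA (st : PySem.Dict Char Int × PySem.Dict Char Int) (i : Int) (c : Char) :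
    PySem.Dict Char Int × PySem.Dict Char Int :=
  if st.2.contains c = false then
    (st.1.insert c 1, st.2.insert c i)
  else
    (st.1.insert c ((st.1.get? c).getD 0 + 1), st.2)

def nonRepeatingLetter2 (s : String) : Int :=
  let cs := s.toList
  let st := (PySem.List.pyRange 0 (PySem.Str.len s) 1).foldl
    (fun st i => pvBodyA st i (PySem.List.pyGetD cs i ' '))
    (PySem.Dict.empty, PySem.Dict.empty)
  match PySem.List.min2? st.1.items Prod.fst Prod.snd with
  | none => 0  -- min() of the empty dict raises ValueError: excluded by Pre_
  | some p =>
    if p.2 == 1 then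
      match PySem.List.min2? st.2.items Prod.fst Prod.snd with
      | none => 0  -- unreachable (letterLoc has the same keys as letterDict)
      | some q => q.2
    else -1

-- ===== PORT B =====
-- B's loop body: (best, idx, cnt) updated by the pair (i, c) from enumerate(s[1:], 1)
def pvStepB (st : Char × Int × Int) (p : Int × Char) : Char × Int × Int :=
  if p.2 < st.1 then (p.2, p.1, 1)
  else if p.2 == st.1 then (st.1, st.2.1, st.2.2 + 1)
  else st

def nonRepeatingLetter2_alt (s : String) : Int :=
  match s.toList with
  | [] => 0  -- s[0] raises IndexError on the empty string: excluded by Pre_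
  | c0 :: t =>
    let st := (PySem.List.enumerate t 1).foldl pvStepB (c0, 0, 1)
    if st.2.2 == 1 then st.2.1 else -1

-- ===== PRECONDITION & SPEC =====
-- Pre_ excludes only the empty string, on which A raises ValueError (min of an empty dict).
def Pre_nonRepeatingLetter2 (s : String) : Prop := s.toList ≠ []
instance (s : String) : Decidable (Pre_nonRepeatingLetter2 s) := by unfold Pre_nonRepeatingLetter2; infer_instance
def pvWitness_nonRepeatingLetter2 : String := "ab"

def Spec_nonRepeatingLetter2 (s : String) (out : Int) : Prop := out = nonRepeatingLetter2_alt s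
instance (s : String) (out : Int) : Decidable (Spec_nonRepeatingLetter2 s out) := by unfold Spec_nonRepeatingLetter2; infer_instance

-- ===== CLAIM (what is proved, stated in full; the proofs are below) =====
def Claim_equal_nonRepeatingLetter2 : Prop := ∀ (s : String), Dom_nonRepeatingLetter2 s → Pre_nonRepeatingLetter2 s → Spec_nonRepeatingLetter2 s (nonRepeatingLetter2 s)

-- ===== LEMMAS AND PROOFS =====

-- the first-occurrence items A's letterLoc dict accumulates, scanning from index i with 'seen' predicate p
def pvLocItems (i : Int) (p : Char → Bool) : List Char → List (Char × Int)
  | [] => []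
  | c :: t => if p c then pvLocItems (i+1) p t else (c, i) :: pvLocItems (i+1) (fun x => x == c || p x) t

-- an index loop reading xs[i] is the loop over enumerate(xs)
theorem pv_fold_range_enum {σ : Type} (G : σ → Int → Char → σ) (d : Char) :
    ∀ (t pre : List Char) (init : σ),
      (PySem.List.pyRange (pre.length : Int) ((pre.length + t.length : Nat) : Int) 1).foldl
          (fun st i => G st i (PySem.List.pyGetD (pre ++ t) i d)) init
        = (PySem.List.enumerate t (pre.length : Int)).foldl (fun st p => G st p.1 p.2) init := by
  intro t
  induction t with
  | nil =>
    intro pre init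
    rw [PySem.List.pyRange_one_eq_nil (by simp), PySem.List.enumerate_nil]
    rfl
  | cons c t ih =>
    intro pre init
    have hlt : (pre.length : Int) < ((pre.length + (c :: t).length : Nat) : Int) := by
      exact_mod_cast Nat.lt_add_of_pos_right (by simp)
    rw [PySem.List.pyRange_one_cons hlt, PySem.List.enumerate_cons]
    simp only [List.foldl_cons]
    have hget : PySem.List.pyGetD (pre ++ c :: t) (pre.length : Int) d = c := by
      rw [PySem.List.pyGetD_natCast]
      rw [List.getD_eq_getElem?_getD, List.getElem?_append_right (le_refl pre.length)]
      simp
    rw [hget]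
    have h2 := ih (pre ++ [c]) (G init (pre.length : Int) c)
    rw [← List.append_cons] at h2
    have e1 : ((pre ++ [c]).length : Int) = (pre.length : Int) + 1 := by simp
    have e2 : (((pre ++ [c]).length + t.length : Nat) : Int) = ((pre.length + (c :: t).length : Nat) : Int) := by
      have e2n : (pre ++ [c]).length + t.length = pre.length + (c :: t).length := by
        simp only [List.length_append, List.length_cons, List.length_nil]
        omega
      rw [e2n]
    rw [e1, e2] at h2
    exact h2

-- A's loop, split: letterDict is the counting fold, letterLoc's items are pvLocItems
theorem pv_loop_eq : ∀ (t : List Char) (i : Int) (d1 d2 : PySem.Dict Char Int),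
    (∀ x, d1.contains x = d2.contains x) →
    (PySem.List.enumerate t i).foldl (fun st p => pvBodyA st p.1 p.2) (d1, d2)
      = (t.foldl (fun d x => d.insert x (d.getD x 0 + 1)) d1,
         PySem.Dict.mk (d2.items ++ pvLocItems i (fun x => d2.contains x) t)) := by
  intro t
  induction t with
  | nil =>
    intro i d1 d2 _
    rw [PySem.List.enumerate_nil]
    simp [pvLocItems]
  | cons c t ih =>
    intro i d1 d2 hinv
    rw [PySem.List.enumerate_cons]
    simp only [List.foldl_cons]
    cases hc : d2.contains c with
    | false =>
      have hd1c : d1.contains c = false := by rw [hinv]; exact hc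
      have hbody : pvBodyA (d1, d2) i c = (d1.insert c 1, d2.insert c i) := by
        simp [pvBodyA, hc]
      rw [hbody]
      have hinv' : ∀ x, (d1.insert c 1).contains x = (d2.insert c i).contains x := by
        intro x
        rw [PySem.Dict.contains_insert, PySem.Dict.contains_insert, hinv x]
      rw [ih (i+1) _ _ hinv']
      have hins : d1.insert c 1 = d1.insert c (d1.getD c 0 + 1) := by
        rw [PySem.Dict.getD_of_not_contains d1 0 hd1c]
        norm_num
      have hitems : (d2.insert c i).items = d2.items ++ [(c, i)] :=
        PySem.Dict.items_insert_of_not_contains d2 i hc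
      have hpred : (fun x => (d2.insert c i).contains x) = (fun x => x == c || d2.contains x) := by
        funext x; rw [PySem.Dict.contains_insert]
      have hloc : pvLocItems i (fun x => d2.contains x) (c :: t)
          = (c, i) :: pvLocItems (i+1) (fun x => x == c || d2.contains x) t := by
        rw [pvLocItems, hc]; simp
      rw [hitems, hpred, hloc]
      simp [hins]
    | true =>
      have hd1c : d1.contains c = true := by rw [hinv]; exact hc
      have hbody : pvBodyA (d1, d2) i c = (d1.insert c ((d1.get? c).getD 0 + 1), d2) := by
        simp [pvBodyA, hc]
      rw [hbody]
      have hinv' : ∀ x, (d1.insert c ((d1.get? c).getD 0 + 1)).contains x = d2.contains x := by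
        intro x
        rw [PySem.Dict.contains_insert]
        cases hxc : x == c with
        | true => simp at hxc; subst hxc; simp [hc]
        | false => simp [hinv x]
      rw [ih (i+1) _ _ hinv']
      have hloc : pvLocItems i (fun x => d2.contains x) (c :: t)
          = pvLocItems (i+1) (fun x => d2.contains x) t := by
        rw [pvLocItems, hc]; simp
      rw [hloc]
      have hins : d1.insert c ((d1.get? c).getD 0 + 1) = d1.insert c (d1.getD c 0 + 1) := by
        rw [PySem.Dict.getD_eq_get?_getD]
      simp [hins]

theorem pv_locItems_mem_spec : ∀ (t : List Char) (i : Int) (p : Char → Bool) (q : Char × Int),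
    q ∈ pvLocItems i p t → p q.1 = false ∧ q.1 ∈ t ∧ q.2 = i + (t.idxOf q.1 : Int) := by
  intro t
  induction t with
  | nil => intro i p q hq; simp [pvLocItems] at hq
  | cons c t ih =>
    intro i p q hq
    rw [pvLocItems] at hq
    cases hpc : p c with
    | true =>
      rw [hpc] at hq; simp at hq
      obtain ⟨h1, h2, h3⟩ := ih (i+1) p q hq
      have hne : (c == q.1) = false := by
        cases hbe : c == q.1 with
        | true => simp at hbe; rw [← hbe] at h1; rw [h1] at hpc; cases hpc
        | false => rfl
      refine ⟨h1, List.mem_cons_of_mem _ h2, ?_⟩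
      rw [List.idxOf_cons, hne]
      simp only [cond_false]
      push_cast
      omega
    | false =>
      rw [hpc] at hq; simp at hq
      rcases hq with rfl | hq
      · refine ⟨hpc, List.mem_cons_self, ?_⟩
        simp
      · obtain ⟨h1, h2, h3⟩ := ih (i+1) _ q hq
        simp only [Bool.or_eq_false_iff] at h1
        obtain ⟨h1a, h1b⟩ := h1
        have hne : (c == q.1) = false := by
          cases hbe : c == q.1 with
          | true => simp at hbe; simp [hbe] at h1a
          | false => rfl
        refine ⟨h1b, List.mem_cons_of_mem _ h2, ?_⟩
        rw [List.idxOf_cons, hne]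
        simp only [cond_false]
        push_cast
        omega

theorem pv_locItems_mem : ∀ (t : List Char) (i : Int) (p : Char → Bool) (c0 : Char),
    c0 ∈ t → p c0 = false → (c0, i + (t.idxOf c0 : Int)) ∈ pvLocItems i p t := by
  intro t
  induction t with
  | nil => intro i p c0 h; cases h
  | cons c t ih =>
    intro i p c0 hmem hp
    by_cases hc : c0 = c
    · subst hc
      rw [pvLocItems, hp]
      simp
    · have hmem' : c0 ∈ t := by
        rcases List.mem_cons.mp hmem with h | h
        · exact absurd h hc
        · exact h
      have hidx : ((c :: t).idxOf c0 : Int) = (t.idxOf c0 : Int) + 1 := by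
        rw [List.idxOf_cons]
        have : (c == c0) = false := by
          cases hbe : c == c0 with
          | true => simp at hbe; exact absurd hbe.symm hc
          | false => rfl
        rw [this]
        simp only [cond_false]
        push_cast; ring
      rw [pvLocItems]
      cases hpc : p c with
      | true =>
        have := ih (i+1) p c0 hmem' hp
        have hgoal : (c0, i + ((c :: t).idxOf c0 : Int)) = (c0, (i+1) + (t.idxOf c0 : Int)) := by
          rw [hidx]; ring_nf
        rw [hgoal]
        exact this
      | false =>
        simp only [Bool.false_eq_true, if_false]
        have hp' : ((c0 == c || p c0) : Bool) = false := by
          have : (c0 == c) = false := by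
            cases hbe : c0 == c with
            | true => simp at hbe; exact absurd hbe hc
            | false => rfl
          rw [this, hp]; rfl
        have := ih (i+1) (fun x => x == c || p x) c0 hmem' hp'
        have hgoal : (c0, i + ((c :: t).idxOf c0 : Int)) = (c0, (i+1) + (t.idxOf c0 : Int)) := by
          rw [hidx]; ring_nf
        rw [hgoal]
        exact List.mem_cons_of_mem _ this

-- Python's min over (char, int) pairs picks the entry with the strictly smallest key
def pvMinStep (acc : Option (Char × Int)) (x : Char × Int) : Option (Char × Int) :=
  match acc with
  | none => some x
  | some m => if (decide (x.1 < m.1) || !decide (m.1 < x.1) && decide (x.2 < m.2)) = true then some x else some m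

theorem pv_min2_eq_foldl (l : List (Char × Int)) :
    PySem.List.min2? l Prod.fst Prod.snd = l.foldl pvMinStep none := by
  unfold PySem.List.min2?
  congr 1
  funext acc x
  cases acc <;> rfl

theorem pv_minStep_keep : ∀ (l : List (Char × Int)) (p : Char × Int),
    (∀ q ∈ l, q = p ∨ p.1 < q.1) → l.foldl pvMinStep (some p) = some p := by
  intro l
  induction l with
  | nil => intro p _; rfl
  | cons x t ih =>
    intro p h
    have hstep : pvMinStep (some p) x = some p := by
      rcases h x List.mem_cons_self with rfl | h1
      · simp [pvMinStep]
      · simp [pvMinStep, h1, lt_asymm h1]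
    rw [List.foldl_cons, hstep]
    exact ih p (fun q hq => h q (List.mem_cons_of_mem _ hq))

theorem pv_minStep_beats : ∀ (l : List (Char × Int)) (m p : Char × Int),
    p ∈ l → (∀ q ∈ l, q = p ∨ p.1 < q.1) → p.1 < m.1 → l.foldl pvMinStep (some m) = some p := by
  intro l
  induction l with
  | nil => intro m p hp; cases hp
  | cons x t ih =>
    intro m p hp h hpm
    by_cases hx : x = p
    · subst hx
      have hstep : pvMinStep (some m) x = some x := by
        simp [pvMinStep, hpm]
      rw [List.foldl_cons, hstep]
      exact pv_minStep_keep t x (fun q hq => h q (List.mem_cons_of_mem _ hq))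
    · have hpx : p.1 < x.1 := by
        rcases h x List.mem_cons_self with h1 | h1
        · exact absurd h1 hx
        · exact h1
      have hp' : p ∈ t := by
        rcases List.mem_cons.mp hp with h1 | h1
        · exact absurd h1.symm hx
        · exact h1
      have hh : t.foldl pvMinStep (pvMinStep (some m) x) = some p := by
        have : pvMinStep (some m) x = some x ∨ pvMinStep (some m) x = some m := by
          simp only [pvMinStep]
          split
          · left; rfl
          · right; rfl
        rcases this with h2 | h2
        · rw [h2]; exact ih x p hp' (fun q hq => h q (List.mem_cons_of_mem _ hq)) hpx
        · rw [h2]; exact ih m p hp' (fun q hq => h q (List.mem_cons_of_mem _ hq)) hpm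
      rw [List.foldl_cons]
      exact hh

theorem pv_min2_strict (l : List (Char × Int)) (p : Char × Int) (hp : p ∈ l)
    (h : ∀ q ∈ l, q = p ∨ p.1 < q.1) :
    PySem.List.min2? l Prod.fst Prod.snd = some p := by
  rw [pv_min2_eq_foldl]
  cases l with
  | nil => cases hp
  | cons x t =>
    rw [List.foldl_cons]
    have hx0 : pvMinStep none x = some x := rfl
    rw [hx0]
    by_cases hx : x = p
    · subst hx
      exact pv_minStep_keep t x (fun q hq => h q (List.mem_cons_of_mem _ hq))
    · have hpx : p.1 < x.1 := by
        rcases h x List.mem_cons_self with h1 | h1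
        · exact absurd h1 hx
        · exact h1
      have hp' : p ∈ t := by
        rcases List.mem_cons.mp hp with h1 | h1
        · exact absurd h1.symm hx
        · exact h1
      exact pv_minStep_beats t x p hp' (fun q hq => h q (List.mem_cons_of_mem _ hq)) hpx

-- B's tournament fold computes (some) minimal char together with its first index and its count
theorem pv_foldB : ∀ (t pre : List Char) (b : Char),
    b ∈ pre → (∀ y ∈ pre, b ≤ y) →
    ∃ m, (PySem.List.enumerate t (pre.length : Int)).foldl pvStepB
            (b, ((pre.idxOf b : Nat) : Int), ((pre.count b : Nat) : Int))
          = (m, (((pre ++ t).idxOf m : Nat) : Int), (((pre ++ t).count m : Nat) : Int))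
        ∧ m ∈ pre ++ t ∧ ∀ y ∈ pre ++ t, m ≤ y := by
  intro t
  induction t with
  | nil =>
    intro pre b hb hmin
    exact ⟨b, by rw [PySem.List.enumerate_nil]; simp, by simpa using hb, by simpa using hmin⟩
  | cons c t ih =>
    intro pre b hb hmin
    rw [PySem.List.enumerate_cons, List.foldl_cons]
    by_cases hlt : c < b
    · -- new strict minimum: c does not occur in pre
      have hnotin : c ∉ pre := fun h => absurd (hmin c h) (not_le.mpr hlt)
      have hstep : pvStepB (b, ((pre.idxOf b : Nat) : Int), ((pre.count b : Nat) : Int))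
          ((pre.length : Int), c) = (c, (pre.length : Int), 1) := by
        simp [pvStepB, hlt]
      rw [hstep]
      have hidx : (((pre ++ [c]).idxOf c : Nat) : Int) = (pre.length : Int) := by
        rw [List.idxOf_append_of_notMem hnotin]
        simp
      have hcnt : (((pre ++ [c]).count c : Nat) : Int) = 1 := by
        rw [List.count_append, List.count_eq_zero.mpr hnotin]
        simp
      have hmem : c ∈ pre ++ [c] := by simp
      have hmin' : ∀ y ∈ pre ++ [c], c ≤ y := by
        intro y hy
        rcases List.mem_append.mp hy with hy | hy
        · exact le_of_lt (lt_of_lt_of_le hlt (hmin y hy))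
        · rw [List.mem_singleton] at hy; exact le_of_eq hy.symm
      have hrec := ih (pre ++ [c]) c hmem hmin'
      rw [hidx, hcnt] at hrec
      simp only [List.length_append, List.length_cons, List.length_nil] at hrec
      have hlen : ((pre.length + (0 + 1) : Nat) : Int) = (pre.length : Int) + 1 := by push_cast; ring
      rw [List.append_assoc] at hrec
      simp only [Nat.cast_add, Nat.cast_one, List.singleton_append] at hrec
      exact hrec
    · by_cases heq : c = b
      · subst heq
        have hstep : pvStepB (c, ((pre.idxOf c : Nat) : Int), ((pre.count c : Nat) : Int))
            ((pre.length : Int), c) = (c, ((pre.idxOf c : Nat) : Int), ((pre.count c : Nat) : Int) + 1) := by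
          simp [pvStepB]
        rw [hstep]
        have hidx : (((pre ++ [c]).idxOf c : Nat) : Int) = ((pre.idxOf c : Nat) : Int) := by
          rw [List.idxOf_append_of_mem hb]
        have hcnt : (((pre ++ [c]).count c : Nat) : Int) = ((pre.count c : Nat) : Int) + 1 := by
          rw [List.count_append]
          simp
        have hmem : c ∈ pre ++ [c] := by simp
        have hmin' : ∀ y ∈ pre ++ [c], c ≤ y := by
          intro y hy
          rcases List.mem_append.mp hy with hy | hy
          · exact hmin y hy
          · rw [List.mem_singleton] at hy; exact le_of_eq hy.symm
        have hrec := ih (pre ++ [c]) c hmem hmin'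
        rw [hidx, hcnt] at hrec
        simp only [List.length_append, List.length_cons, List.length_nil] at hrec
        rw [List.append_assoc] at hrec
        simp only [Nat.cast_add, Nat.cast_one, List.singleton_append] at hrec
        exact hrec
      · -- c > b: state unchanged
        have hbeq : (c == b) = false := by
          cases hbe : c == b with
          | true => simp at hbe; exact absurd hbe heq
          | false => rfl
        have hstep : pvStepB (b, ((pre.idxOf b : Nat) : Int), ((pre.count b : Nat) : Int))
            ((pre.length : Int), c) = (b, ((pre.idxOf b : Nat) : Int), ((pre.count b : Nat) : Int)) := by
          simp [pvStepB, hlt, hbeq]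
        rw [hstep]
        have hidx : (((pre ++ [c]).idxOf b : Nat) : Int) = ((pre.idxOf b : Nat) : Int) := by
          rw [List.idxOf_append_of_mem hb]
        have hcnt : (((pre ++ [c]).count b : Nat) : Int) = ((pre.count b : Nat) : Int) := by
          rw [List.count_append]
          simp [List.count_singleton, hbeq]
        have hmem : b ∈ pre ++ [c] := List.mem_append_left _ hb
        have hmin' : ∀ y ∈ pre ++ [c], b ≤ y := by
          intro y hy
          rcases List.mem_append.mp hy with hy | hy
          · exact hmin y hy
          · rw [List.mem_singleton] at hy; subst hy; exact le_of_not_gt hlt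
        have hrec := ih (pre ++ [c]) b hmem hmin'
        rw [hidx, hcnt] at hrec
        simp only [List.length_append, List.length_cons, List.length_nil] at hrec
        rw [List.append_assoc] at hrec
        simp only [Nat.cast_add, Nat.cast_one, List.singleton_append] at hrec
        exact hrec

-- ===== VERDICT (by name: the statement is the Claim_ definition above) =====
theorem nonRepeatingLetter2_spec : Claim_equal_nonRepeatingLetter2 := by
  intro s _ hpre
  unfold Spec_nonRepeatingLetter2 nonRepeatingLetter2 nonRepeatingLetter2_alt
  simp only []
  obtain ⟨c0, t, hcs⟩ : ∃ c0 t, s.toList = c0 :: t := by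
    cases h : s.toList with
    | nil => exact absurd h hpre
    | cons a l => exact ⟨a, l, rfl⟩
  -- B's side: the fold computes a minimal char m with its first index and count
  obtain ⟨m, hfold, hmmem, hmmin⟩ := pv_foldB t [c0] c0 (by simp) (by simp)
  simp only [List.length_cons, List.length_nil, List.idxOf_cons_self, List.count_cons_self,
    List.count_nil, List.cons_append, List.nil_append, Nat.cast_zero, Nat.cast_one,
    Nat.zero_add] at hfold
  have hmmem' : m ∈ s.toList := by rw [hcs]; simpa using hmmem
  have hmmin' : ∀ y ∈ s.toList, m ≤ y := by rw [hcs]; simpa using hmmin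
  -- A's side: reduce the index loop to the counting fold and pvLocItems
  have hrange := pv_fold_range_enum (fun st i ch => pvBodyA st i ch) ' ' s.toList []
    ((PySem.Dict.empty : PySem.Dict Char Int), (PySem.Dict.empty : PySem.Dict Char Int))
  simp only [List.length_nil, List.nil_append, Nat.cast_zero, zero_add] at hrange
  have hloop := pv_loop_eq s.toList 0 PySem.Dict.empty PySem.Dict.empty (fun x => rfl)
  rw [PySem.Str.len_eq, hrange, hloop, PySem.Dict.foldl_insert_getD_add_one_eq_counter]
  have hminD : PySem.List.min2? (PySem.Dict.counter s.toList).items Prod.fst Prod.snd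
      = some (m, (List.count m s.toList : Int)) := by
    rw [PySem.Dict.items_counter]
    apply pv_min2_strict
    · exact List.mem_map.mpr ⟨m, (PySem.Set.mem_ofList _ _).mpr hmmem', rfl⟩
    · intro q hq
      obtain ⟨k, hk, rfl⟩ := List.mem_map.mp hq
      have hk' : k ∈ s.toList := (PySem.Set.mem_ofList _ _).mp hk
      by_cases hkc : k = m
      · left; rw [hkc]
      · right; exact lt_of_le_of_ne (hmmin' k hk') (fun hcc => hkc hcc.symm)
  have hlocitems : (PySem.Dict.mk ((PySem.Dict.empty : PySem.Dict Char Int).items ++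
      pvLocItems 0 (fun x => (PySem.Dict.empty : PySem.Dict Char Int).contains x) s.toList)).items
      = pvLocItems 0 (fun x => (PySem.Dict.empty : PySem.Dict Char Int).contains x) s.toList := by
    rfl
  have hminL : PySem.List.min2? (pvLocItems 0
      (fun x => (PySem.Dict.empty : PySem.Dict Char Int).contains x) s.toList) Prod.fst Prod.snd
      = some (m, 0 + (s.toList.idxOf m : Int)) := by
    apply pv_min2_strict
    · exact pv_locItems_mem s.toList 0 _ m hmmem' (PySem.Dict.contains_empty m)
    · intro q hq
      obtain ⟨_, h2, h3⟩ := pv_locItems_mem_spec s.toList 0 _ q hq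
      by_cases hqc : q.1 = m
      · left
        have : q = (q.1, q.2) := rfl
        rw [this, hqc, h3, hqc]
      · right; exact lt_of_le_of_ne (hmmin' q.1 h2) (fun hcc => hqc hcc.symm)
  rw [hminD, hlocitems, hminL]
  dsimp only
  rw [hcs]
  dsimp only
  rw [hfold]
  dsimp only
  by_cases hn : List.count m (c0 :: t) = 1
  · have h1 : ((List.count m (c0 :: t) : Int) == 1) = true := by rw [hn]; rfl
    rw [h1]
    simp
  · have h1 : ((List.count m (c0 :: t) : Int) == 1) = false := by
      simp [Nat.cast_eq_one, hn]
    rw [h1]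
    simp
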